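-- pv_equiv track=rewrite | github.com/aidos-lab/Topo_LLM_public | topollm/path_management/validate_path_part.py | validate_path_part
-- ===== SOURCE A (Python) =====
-- def validate_path_part(
--     path_part: str,
-- ) -> bool:
--     """Validate if a string is suitable for file paths.
--
--     This also checks for common issues that would appear when using gsutil for Google Cloud bucket operations,
--     in particular, the following characters are not allowed because they might be interpreted as wildcard:
--     `*`, `?`, `[`, `]`.
--     Also see the following discussions:
--     - https://stackoverflow.com/questions/42087510/gsutil-ls-returns-error-contains-wildcard
--     - https://github.com/GoogleCloudPlatform/gsutil/issues/290
--     - https://cloud.google.com/storage/docs/gsutil/addlhelp/WildcardNames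
--     """
--     # Check if the path part is a string
--     if not isinstance(
--         path_part,
--         str,
--     ):
--         return False
--
--     gsutil_wildcard_characters: list[str] = [
--         "*",
--         "?",
--         "[",
--         "]",
--     ]
--
--     osx_forbidden_characters: list[str] = [
--         ":",
--     ]
--
--     windows_forbidden_characters: list[str] = [
--         "<",
--         ">",
--         ":",
--         '"',
--         "|",
--         "?",
--         "*",
--     ]
--
--     characters_to_avoid: list[str] = (
--         gsutil_wildcard_characters + osx_forbidden_characters + windows_forbidden_characters
--     )
--
--     # Check if the path part does not contain any of the following characters
--     if any(char in path_part for char in characters_to_avoid):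
--         return False
--     return True
-- ===== SOURCE B (Python) =====
-- # Single early-exit pass over the string with a precomputed bitmask keyed by
-- # character code, instead of nine substring scans of the path.
-- _MASK = sum(1 << ord(c) for c in '*?[]:<>"|')
--
--
-- def validate_path_part(
--     path_part: str,
-- ) -> bool:
--     """Validate if a string is suitable for file paths (no forbidden filesystem/gsutil chars)."""
--     if not isinstance(path_part, str):
--         return False
--     for ch in path_part:
--         o = ord(ch)
--         if o < 128 and (_MASK >> o) & 1:
--             return False
--     return True
-- ===== Notes on version B (the rewrite author's own statement) =====
-- stated objective: alternative
-- what changed: Replaces the loop over nine forbidden characters each doing a substring scan of the path by one early-exit pass over the path's characters testing a bitmask (an integer built once, indexed by character code).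
import Mathlib
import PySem

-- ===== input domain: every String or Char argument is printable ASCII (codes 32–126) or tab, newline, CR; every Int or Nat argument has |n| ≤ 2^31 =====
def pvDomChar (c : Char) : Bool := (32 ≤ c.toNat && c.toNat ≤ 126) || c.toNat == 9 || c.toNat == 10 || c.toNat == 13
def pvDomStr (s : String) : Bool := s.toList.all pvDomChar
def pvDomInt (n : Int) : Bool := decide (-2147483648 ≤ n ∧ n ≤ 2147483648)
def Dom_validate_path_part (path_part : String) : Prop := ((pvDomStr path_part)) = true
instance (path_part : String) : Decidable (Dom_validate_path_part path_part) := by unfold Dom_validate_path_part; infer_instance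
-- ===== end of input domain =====

-- B replaces A's loop of per-forbidden-character substring scans by one early-exit pass over
-- the path's characters testing a precomputed bitmask (alternative decomposition).

-- ===== PORT A =====
def validate_path_part (path_part : String) : Bool :=
  let gsutil_wildcard_characters : List String := ["*", "?", "[", "]"]
  let osx_forbidden_characters : List String := [":"]
  let windows_forbidden_characters : List String := ["<", ">", ":", "\"", "|", "?", "*"]
  let characters_to_avoid : List String :=
    gsutil_wildcard_characters ++ osx_forbidden_characters ++ windows_forbidden_characters
  if characters_to_avoid.any (fun c => PySem.Str.isIn c path_part) then false else true

-- ===== PORT B =====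
-- _MASK = sum(1 << ord(c) for c in '*?[]:<>"|')
def pvMask : Nat :=
  ("*?[]:<>\"|".toList).foldl (fun acc c => acc + (1 <<< c.toNat)) 0

-- the `for ch in path_part: … return False` loop, early exit as structural recursion
def pvScan : List Char → Bool
  | [] => true
  | ch :: rest =>
    let o := ch.toNat
    if o < 128 && ((pvMask >>> o) &&& 1 == 1) then false else pvScan rest

def validate_path_part_alt (path_part : String) : Bool :=
  pvScan path_part.toList

-- ===== PRECONDITION & SPEC =====
def Spec_validate_path_part (path_part : String) (out : Bool) : Prop := out = validate_path_part_alt path_part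
instance (path_part : String) (out : Bool) : Decidable (Spec_validate_path_part path_part out) := by unfold Spec_validate_path_part; infer_instance

-- ===== CLAIM (what is proved, stated in full; the proofs are below) =====
def Claim_equal_validate_path_part : Prop := ∀ (path_part : String), Dom_validate_path_part path_part → Spec_validate_path_part path_part (validate_path_part path_part)

-- ===== LEMMAS AND PROOFS =====

def pvForbidden : PySem.Set Char :=
  PySem.Set.ofList ['*', '?', '[', ']', ':', '<', '>', '"', '|']

theorem validate_path_part_eq (s : String) :
    validate_path_part s = decide (∀ c ∈ s.toList, c ∉ pvForbidden) := by
  unfold validate_path_part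
  rw [Bool.eq_iff_iff]
  simp [PySem.Str.isIn_eq, PySem.Chars.isIn_iff_infix, List.singleton_infix_iff, pvForbidden,
    PySem.Set.ofList]
  constructor
  · rintro ⟨h1,h2,h3,h4,h5,h6,h7,_,h8,h9,_,_⟩ c hc
    refine ⟨fun e => h1 (e ▸ hc), fun e => h2 (e ▸ hc), fun e => h3 (e ▸ hc), fun e => h4 (e ▸ hc), fun e => h5 (e ▸ hc), fun e => h6 (e ▸ hc), fun e => h7 (e ▸ hc), fun e => h8 (e ▸ hc), fun e => h9 (e ▸ hc)⟩
  · intro h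
    refine ⟨fun m => (h _ m).1 rfl, fun m => (h _ m).2.1 rfl, fun m => (h _ m).2.2.1 rfl, fun m => (h _ m).2.2.2.1 rfl, fun m => (h _ m).2.2.2.2.1 rfl, fun m => (h _ m).2.2.2.2.2.1 rfl, fun m => (h _ m).2.2.2.2.2.2.1 rfl, fun m => (h _ m).2.2.2.2.1 rfl, fun m => (h _ m).2.2.2.2.2.2.2.1 rfl, fun m => (h _ m).2.2.2.2.2.2.2.2 rfl, fun m => (h _ m).2.1 rfl, fun m => (h _ m).1 rfl⟩

-- the bitmask test agrees with membership in the forbidden set, for every character code ≤ 126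
theorem pvMask_bit (n : Nat) (hn : n ≤ 126) :
    ((n < 128 && ((pvMask >>> n) &&& 1 == 1)) = true) ↔
      n ∈ [42, 63, 91, 93, 58, 60, 62, 34, 124] := by
  revert hn
  revert n
  decide

theorem char_toNat_mem (c : Char) :
    c.toNat ∈ [42, 63, 91, 93, 58, 60, 62, 34, 124] ↔ c ∈ pvForbidden := by
  have inj : ∀ d : Char, c.toNat = d.toNat → c = d := by
    intro d h
    exact Char.ext (by simpa [Char.toNat] using UInt32.toNat_inj.mp h)
  simp only [pvForbidden, PySem.Set.mem_ofList, List.mem_cons, List.not_mem_nil, or_false]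
  constructor
  · rintro (h|h|h|h|h|h|h|h|h)
    · exact Or.inl (inj '*' h)
    · exact Or.inr (Or.inl (inj '?' h))
    · exact Or.inr (Or.inr (Or.inl (inj '[' h)))
    · exact Or.inr (Or.inr (Or.inr (Or.inl (inj ']' h))))
    · exact Or.inr (Or.inr (Or.inr (Or.inr (Or.inl (inj ':' h)))))
    · exact Or.inr (Or.inr (Or.inr (Or.inr (Or.inr (Or.inl (inj '<' h))))))
    · exact Or.inr (Or.inr (Or.inr (Or.inr (Or.inr (Or.inr (Or.inl (inj '>' h)))))))
    · exact Or.inr (Or.inr (Or.inr (Or.inr (Or.inr (Or.inr (Or.inr (Or.inl (inj '"' h))))))))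
    · exact Or.inr (Or.inr (Or.inr (Or.inr (Or.inr (Or.inr (Or.inr (Or.inr (inj '|' h))))))))
  · rintro (rfl|rfl|rfl|rfl|rfl|rfl|rfl|rfl|rfl) <;> decide

theorem pvScan_eq (l : List Char) (hd : l.all pvDomChar = true) :
    pvScan l = decide (∀ c ∈ l, c ∉ pvForbidden) := by
  induction l with
  | nil => simp [pvScan]
  | cons ch rest ih =>
    simp only [List.all_cons, Bool.and_eq_true] at hd
    have hle : ch.toNat ≤ 126 := by
      have := hd.1
      simp [pvDomChar] at this
      omega
    have hbit := pvMask_bit ch.toNat hle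
    rw [char_toNat_mem] at hbit
    unfold pvScan
    by_cases hmem : ch ∈ pvForbidden
    · rw [if_pos (hbit.mpr hmem)]
      simp [hmem]
    · rw [if_neg (fun h => hmem (hbit.mp h)), ih hd.2]
      simp [hmem]

-- ===== VERDICT (by name: the statement is the Claim_ definition above) =====
theorem validate_path_part_spec : Claim_equal_validate_path_part := by
  intro s hdom
  unfold Spec_validate_path_part validate_path_part_alt
  rw [validate_path_part_eq, pvScan_eq _ hdom]
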